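-- pv_equiv track=rewrite | github.com/facebookresearch/ParlAI | parlai/tasks/light_genderation_bias/agents.py | get_finegrained_count
-- ===== SOURCE A (Python) =====
-- def get_finegrained_count(text, gender_dct):
--     """
--     Count the number of female, male, and neutral gendered words in a string, given the
--     gender dict.
--     """
--     text = text.lower()
--     f_count = 0
--     m_count = 0
--     n_count = 0
--     for line in text.split('\n'):
--         words = line.split(' ')
--         for word in words:
--             if word in gender_dct:
--                 if gender_dct[word]['gender'] == 'F':
--                     f_count += 1
--                 else:
--                     m_count += 1
--             else:
--                 n_count += 1
--
--     return f_count, m_count, n_count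
-- ===== SOURCE B (Python) =====
-- def get_finegrained_count(text, gender_dct):
--     tokens = [w for line in text.lower().split('\n') for w in line.split(' ')]
--     counts = {}
--     for w in tokens:
--         counts[w] = counts.get(w, 0) + 1
--     f_count = 0
--     m_count = 0
--     for word, c in counts.items():
--         info = gender_dct.get(word)
--         if info is not None:
--             if info['gender'] == 'F':
--                 f_count += c
--             else:
--                 m_count += c
--     return f_count, m_count, len(tokens) - f_count - m_count
-- ===== Notes on version B (the rewrite author's own statement) =====
-- stated objective: simpler
-- what changed: Replaces A's nested per-token classification loop (dict membership + lookup per token, three running counters) by building a word-frequency counter in one pass and classifying only the DISTINCT words, adding their counts; the neutral count is derived as total - f - m instead of being accumulated.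
import Mathlib
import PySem

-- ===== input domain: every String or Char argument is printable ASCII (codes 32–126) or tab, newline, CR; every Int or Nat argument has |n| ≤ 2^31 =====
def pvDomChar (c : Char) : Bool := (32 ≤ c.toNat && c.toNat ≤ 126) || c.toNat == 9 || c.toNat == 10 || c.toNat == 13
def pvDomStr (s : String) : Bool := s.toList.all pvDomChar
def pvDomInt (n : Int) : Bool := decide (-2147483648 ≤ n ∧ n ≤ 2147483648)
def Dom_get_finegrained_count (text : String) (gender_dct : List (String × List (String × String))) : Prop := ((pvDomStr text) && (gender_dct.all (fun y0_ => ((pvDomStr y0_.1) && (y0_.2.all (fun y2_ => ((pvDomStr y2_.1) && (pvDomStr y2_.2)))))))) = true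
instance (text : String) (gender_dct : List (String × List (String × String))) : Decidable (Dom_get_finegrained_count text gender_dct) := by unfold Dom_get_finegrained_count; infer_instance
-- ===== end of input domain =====

-- B replaces A's per-token classification loop by one counting pass plus a loop over the
-- DISTINCT words, deriving the neutral count from the total (objective: simpler/alternative).

-- ===== PORT A =====
-- 's.split(sep)' with the nonempty literal separators '\n' and ' ' is PySem.Str.split?,
-- which is 'some' exactly because the separator is nonempty; '.getD []' takes that branch.
def get_finegrained_count (text : String) (gender_dct : List (String × List (String × String))) : Int × Int × Int :=
  let t := PySem.Str.lower text
  ((PySem.Str.split? t "\n").getD []).foldl (fun (acc : Int × Int × Int) line =>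
    ((PySem.Str.split? line " ").getD []).foldl (fun (acc : Int × Int × Int) word =>
      if (PySem.Dict.mk gender_dct).contains word then
        if PySem.Dict.getD (PySem.Dict.mk ((PySem.Dict.mk gender_dct).getD word [])) "gender" "" == "F" then
          (acc.1 + 1, acc.2.1, acc.2.2)
        else
          (acc.1, acc.2.1 + 1, acc.2.2)
      else
        (acc.1, acc.2.1, acc.2.2 + 1)) acc) (0, 0, 0)

-- ===== PORT B =====
def get_finegrained_count_alt (text : String) (gender_dct : List (String × List (String × String))) : Int × Int × Int :=
  let tokens := ((PySem.Str.split? (PySem.Str.lower text) "\n").getD []).flatMap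
    (fun line => (PySem.Str.split? line " ").getD [])
  let counts := tokens.foldl (fun (d : PySem.Dict String Int) w => d.insert w (d.getD w 0 + 1)) PySem.Dict.empty
  let fm := counts.items.foldl (fun (acc : Int × Int) p =>
    match (PySem.Dict.mk gender_dct).get? p.1 with
    | some info =>
        if PySem.Dict.getD (PySem.Dict.mk info) "gender" "" == "F" then (acc.1 + p.2, acc.2)
        else (acc.1, acc.2 + p.2)
    | none => acc) ((0 : Int), (0 : Int))
  (fm.1, fm.2, (tokens.length : Int) - fm.1 - fm.2)

-- ===== PRECONDITION & SPEC =====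
-- Pre_ excludes exactly the inputs on which Python A raises KeyError: some token of the
-- lowered text is a key of gender_dct whose entry dict lacks the key 'gender'.
def Pre_get_finegrained_count (text : String) (gender_dct : List (String × List (String × String))) : Prop :=
  ((((PySem.Str.split? (PySem.Str.lower text) "\n").getD []).flatMap
      (fun line => (PySem.Str.split? line " ").getD [])).all
    (fun w => match (PySem.Dict.mk gender_dct).get? w with
      | some info => (PySem.Dict.mk info).contains "gender"
      | none => true)) = true

instance (text : String) (gender_dct : List (String × List (String × String))) : Decidable (Pre_get_finegrained_count text gender_dct) := by unfold Pre_get_finegrained_count; infer_instance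

def pvWitness_get_finegrained_count : String × (List (String × List (String × String))) :=
  ("She is  here\nhe left", [("she", [("gender", "F")]), ("he", [("gender", "M")])])

def Spec_get_finegrained_count (text : String) (gender_dct : List (String × List (String × String))) (out : Int × Int × Int) : Prop := out = get_finegrained_count_alt text gender_dct
instance (text : String) (gender_dct : List (String × List (String × String))) (out : Int × Int × Int) : Decidable (Spec_get_finegrained_count text gender_dct out) := by unfold Spec_get_finegrained_count; infer_instance

-- ===== CLAIM (what is proved, stated in full; the proofs are below) =====
def Claim_equal_get_finegrained_count : Prop := ∀ (text : String) (gender_dct : List (String × List (String × String))), Dom_get_finegrained_count text gender_dct → Pre_get_finegrained_count text gender_dct → Spec_get_finegrained_count text gender_dct (get_finegrained_count text gender_dct)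

-- ===== LEMMAS AND PROOFS =====

-- classification predicates (proof-only helpers)
def pvF (gender_dct : List (String × List (String × String))) (w : String) : Bool :=
  match (PySem.Dict.mk gender_dct).get? w with
  | some info => PySem.Dict.getD (PySem.Dict.mk info) "gender" "" == "F"
  | none => false

def pvM (gender_dct : List (String × List (String × String))) (w : String) : Bool :=
  match (PySem.Dict.mk gender_dct).get? w with
  | some info => !(PySem.Dict.getD (PySem.Dict.mk info) "gender" "" == "F")
  | none => false

theorem pv_foldl_flatMap {α β : Type} (lines : List α) (g : α → List β)
    (f : (Int × Int × Int) → β → (Int × Int × Int)) (init : Int × Int × Int) :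
    lines.foldl (fun acc line => (g line).foldl f acc) init
      = (lines.flatMap g).foldl f init := by
  induction lines generalizing init with
  | nil => rfl
  | cons l ls ih => simp [List.foldl_append, ih]

theorem pv_loopA (gender_dct : List (String × List (String × String))) (l : List String)
    (acc : Int × Int × Int) :
    l.foldl (fun (acc : Int × Int × Int) word =>
      if (PySem.Dict.mk gender_dct).contains word then
        if PySem.Dict.getD (PySem.Dict.mk ((PySem.Dict.mk gender_dct).getD word [])) "gender" "" == "F" then
          (acc.1 + 1, acc.2.1, acc.2.2)
        else
          (acc.1, acc.2.1 + 1, acc.2.2)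
      else
        (acc.1, acc.2.1, acc.2.2 + 1)) acc
    = (acc.1 + (l.countP (pvF gender_dct) : Int),
       acc.2.1 + (l.countP (pvM gender_dct) : Int),
       acc.2.2 + ((l.length : Int) - (l.countP (pvF gender_dct) : Int) - (l.countP (pvM gender_dct) : Int))) := by
  induction l generalizing acc with
  | nil => simp
  | cons w ws ih =>
    rcases h : (PySem.Dict.mk gender_dct).get? w with _ | info
    · have hc : (PySem.Dict.mk gender_dct).contains w = false := by
        rw [PySem.Dict.contains_eq_isSome_get?, h]; rfl
      simp only [List.foldl_cons, hc, Bool.false_eq_true, if_false, ih,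
        List.countP_cons, List.length_cons, pvF, pvM, h]
      refine Prod.ext ?_ (Prod.ext ?_ ?_) <;> simp <;> push_cast <;> ring
    · have hc : (PySem.Dict.mk gender_dct).contains w = true := by
        rw [PySem.Dict.contains_eq_isSome_get?, h]; rfl
      have hg : (PySem.Dict.mk gender_dct).getD w [] = info :=
        PySem.Dict.getD_of_get?_eq_some _ [] h
      by_cases hf : PySem.Dict.getD (PySem.Dict.mk info) "gender" "" == "F"
      · simp only [List.foldl_cons, hc, if_true, hg, hf, ih, List.countP_cons,
          List.length_cons, pvF, pvM, h]
        refine Prod.ext ?_ (Prod.ext ?_ ?_) <;> simp [hf] <;> push_cast <;> ring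
      · simp only [List.foldl_cons, hc, if_true, hg, ih, List.countP_cons,
          List.length_cons, pvF, pvM, h]
        rw [if_neg (by simp [hf])]
        refine Prod.ext ?_ (Prod.ext ?_ ?_) <;> simp [hf] <;> push_cast <;> ring

theorem pv_loopB (gender_dct : List (String × List (String × String)))
    (L : List (String × Int)) (acc : Int × Int) :
    L.foldl (fun (acc : Int × Int) p =>
      match (PySem.Dict.mk gender_dct).get? p.1 with
      | some info =>
          if PySem.Dict.getD (PySem.Dict.mk info) "gender" "" == "F" then (acc.1 + p.2, acc.2)
          else (acc.1, acc.2 + p.2)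
      | none => acc) acc
    = (acc.1 + ((L.filter (fun p => pvF gender_dct p.1)).map (·.2)).sum,
       acc.2 + ((L.filter (fun p => pvM gender_dct p.1)).map (·.2)).sum) := by
  induction L generalizing acc with
  | nil => simp
  | cons p ps ih =>
    rcases h : (PySem.Dict.mk gender_dct).get? p.1 with _ | info
    · simp only [List.foldl_cons, h, ih, List.filter_cons, pvF, pvM]
      simp [h]
    · by_cases hf : PySem.Dict.getD (PySem.Dict.mk info) "gender" "" == "F"
      · simp only [List.foldl_cons, h, hf, if_true, ih, List.filter_cons, pvF, pvM]
        simp [h, hf] <;> ring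
      · simp only [List.foldl_cons, h, ih, List.filter_cons, pvF, pvM]
        rw [if_neg (by simp [hf])]
        simp [h, hf] <;> ring

-- sum of counts over the distinct words satisfying p = countP p, transported from
-- Mathlib's dedup to PySem's (first-occurrence) dedup via a permutation
theorem pv_sum_count (p : String → Bool) (tokens : List String) :
    ((List.filter p (PySem.Set.ofList tokens)).map (fun k => (tokens.count k : Int))).sum
      = (tokens.countP p : Int) := by
  have hperm : List.Perm (PySem.Set.ofList tokens) tokens.dedup := by
    rw [← PySem.List.dedup_eq_ofList]
    exact (List.perm_ext_iff_of_nodup (PySem.List.nodup_dedup tokens) tokens.nodup_dedup).2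
      (fun a => by rw [PySem.List.mem_dedup, List.mem_dedup])
  rw [List.Perm.sum_eq (List.Perm.map (fun k => (tokens.count k : Int)) (List.Perm.filter p hperm))]
  have h2 : ((tokens.dedup.filter p).map (fun k => (tokens.count k : Int))).sum
      = (((tokens.dedup.filter p).map (fun k => tokens.count k)).sum : Int) := by
    induction tokens.dedup.filter p with
    | nil => simp
    | cons a l ih => simp only [List.map_cons, List.sum_cons, ih]; push_cast; ring
  rw [h2, List.sum_map_count_dedup_filter_eq_countP p tokens]

theorem get_finegrained_count_eq (text : String)
    (gender_dct : List (String × List (String × String))) :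
    get_finegrained_count text gender_dct = get_finegrained_count_alt text gender_dct := by
  simp only [get_finegrained_count, get_finegrained_count_alt]
  rw [pv_foldl_flatMap, pv_loopA]
  rw [PySem.Dict.foldl_insert_getD_add_one_eq_counter, PySem.Dict.items_counter, pv_loopB]
  rw [List.filter_map, List.filter_map, List.map_map, List.map_map]
  simp only [Function.comp_def]
  rw [pv_sum_count (pvF gender_dct), pv_sum_count (pvM gender_dct)]
  rw [Prod.mk.injEq, Prod.mk.injEq]
  refine ⟨by ring, by ring, by ring⟩

-- ===== VERDICT (by name: the statement is the Claim_ definition above) =====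
theorem get_finegrained_count_spec : Claim_equal_get_finegrained_count := by
  intro text gender_dct _ _
  unfold Spec_get_finegrained_count
  exact get_finegrained_count_eq text gender_dct
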